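-- pv_equiv track=rewrite | github.com/KMORaza/leetcode-solutions | LeetCode Solutions/1434.py | numberWays
-- ===== SOURCE A (Python) =====
-- from typing import List
-- from collections import defaultdict
--
-- def numberWays(hats: List[List[int]]) -> int:
--     x = 1000000007
--     N = len(hats)
--     hat_to_people = defaultdict(list)
--     for person, hats_list in enumerate(hats):
--         for hat in hats_list:
--             hat_to_people[hat].append(person)
--     dp = [0] * (1 << N)
--     dp[0] = 1
--     for hat in range(1, 41):
--         if hat not in hat_to_people:
--             continue
--         people = hat_to_people[hat]
--         for mask in range((1 << N) - 1, -1, -1):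
--             if dp[mask] == 0:
--                 continue
--             for person in people:
--                 if mask & (1 << person) == 0:
--                     new_mask = mask | (1 << person)
--                     dp[new_mask] = (dp[new_mask] + dp[mask]) % x
--     return dp[(1 << N) - 1]
-- ===== SOURCE B (Python) =====
-- from typing import List
-- from collections import defaultdict
-- from functools import lru_cache
--
-- def numberWays(hats: List[List[int]]) -> int:
--     MOD = 1000000007
--     N = len(hats)
--     full = (1 << N) - 1
--     hat_to_people = defaultdict(list)
--     for person, hats_list in enumerate(hats):
--         for hat in hats_list:
--             hat_to_people[hat].append(person)
--
--     @lru_cache(maxsize=None)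
--     def f(hat, mask):
--         # ways to reach the full mask using hats hat..40, given people `mask` already assigned
--         if hat == 41:
--             return 1 if mask == full else 0
--         total = f(hat + 1, mask)
--         if hat in hat_to_people:
--             for person in hat_to_people[hat]:
--                 if mask & (1 << person) == 0:
--                     total += f(hat + 1, mask | (1 << person))
--         return total % MOD
--
--     return f(1, 0)
-- ===== Notes on version B (the rewrite author's own statement) =====
-- stated objective: faster
-- what changed: Replaced the bottom-up in-place dp array that rescans all 2^N masks for every present hat by a top-down memoized recursion f(hat, mask) with base case hat == 41, which only visits (hat, mask) states reachable from the empty assignment.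
import Mathlib
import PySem

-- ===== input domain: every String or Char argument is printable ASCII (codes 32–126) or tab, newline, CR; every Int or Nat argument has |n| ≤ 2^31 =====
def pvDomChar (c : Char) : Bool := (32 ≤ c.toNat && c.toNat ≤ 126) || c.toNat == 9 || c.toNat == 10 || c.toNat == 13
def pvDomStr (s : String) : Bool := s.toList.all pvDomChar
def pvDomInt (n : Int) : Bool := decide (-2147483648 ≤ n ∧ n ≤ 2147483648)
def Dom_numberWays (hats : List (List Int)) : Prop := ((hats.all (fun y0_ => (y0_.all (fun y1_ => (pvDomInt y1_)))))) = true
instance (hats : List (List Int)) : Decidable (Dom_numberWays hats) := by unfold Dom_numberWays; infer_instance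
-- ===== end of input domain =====

-- B replaces A's bottom-up in-place dp array (all 2^N masks rescanned per hat) by a top-down
-- memoized recursion f(hat, mask) with base case hat == 41, evaluating only reachable states
-- (measurably faster on the generated inputs).


-- ===== PORT A =====
-- shared helper: both Pythons build the identical hat → people mapping
-- (defaultdict(list) loop; persons are the enumerate indices, appended in order)
def buildMap (hats : List (List Int)) : PySem.Dict Int (List Int) :=
  (PySem.List.enumerate hats).foldl
    (fun d pl => pl.2.foldl (fun d hat => d.modify hat [] (· ++ [pl.1])) d)
    PySem.Dict.empty

-- inner `for person in people` loop of A (person ≥ 0 by construction, so `1 << person`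
-- is ported as `1 <<< person.toNat`; dp indices are in range, so getD/set are exact;
-- Python `%` with the positive modulus 1000000007 is Int.emod)
def aInner (x : Int) (people : List Int) (mask : Nat) (dp : List Int) : List Int :=
  people.foldl (fun dp person =>
    if mask &&& (1 <<< person.toNat) == 0 then
      let nm := mask ||| (1 <<< person.toNat)
      dp.set nm ((dp.getD nm 0 + dp.getD mask 0) % x)
    else dp) dp

-- body of A's `for mask in range((1 << N) - 1, -1, -1)` loop
def aMaskStep (x : Int) (people : List Int) (dp : List Int) (mask : Nat) : List Int :=
  if dp.getD mask 0 == 0 then dp else aInner x people mask dp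

-- body of A's `for hat in range(1, 41)` loop (masks (1<<N)-1 .. 0 = (List.range (1<<<N)).reverse)
def aHatStep (N : Nat) (m : PySem.Dict Int (List Int)) (dp : List Int) (hat : Int) : List Int :=
  match m.get? hat with
  | none => dp
  | some people => ((List.range (1 <<< N)).reverse).foldl (aMaskStep 1000000007 people) dp

def numberWays (hats : List (List Int)) : Int :=
  let N := hats.length
  let m := buildMap hats
  let dp0 := (List.replicate (1 <<< N) (0 : Int)).set 0 1
  let dpF := (PySem.List.pyRange 1 41 1).foldl (aHatStep N m) dp0
  dpF.getD ((1 <<< N) - 1) 0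

-- ===== PORT B =====
-- B's memoized recursion f(hat, mask); lru_cache is semantically transparent, so the port is
-- the plain recursion, made structural on fuel = 41 - hat (base case fuel 0 ↔ hat == 41)
def altF (m : PySem.Dict Int (List Int)) (full : Nat) : Nat → Int → Nat → Int
  | 0, _, mask => if mask == full then 1 else 0
  | fuel+1, hat, mask =>
    let total := altF m full fuel (hat+1) mask
    let total := if m.contains hat then
        (m.getD hat []).foldl (fun total person =>
          if mask &&& (1 <<< person.toNat) == 0 then
            total + altF m full fuel (hat+1) (mask ||| (1 <<< person.toNat))
          else total) total
      else total
    total % 1000000007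

def numberWays_alt (hats : List (List Int)) : Int :=
  let N := hats.length
  altF (buildMap hats) ((1 <<< N) - 1) 40 1 0

-- ===== PRECONDITION & SPEC =====
def Spec_numberWays (hats : List (List Int)) (out : Int) : Prop := out = numberWays_alt hats
instance (hats : List (List Int)) (out : Int) : Decidable (Spec_numberWays hats out) := by unfold Spec_numberWays; infer_instance

-- ===== CLAIM (what is proved, stated in full; the proofs are below) =====
def Claim_equal_numberWays : Prop := ∀ (hats : List (List Int)), Dom_numberWays hats → Spec_numberWays hats (numberWays hats)

-- ===== LEMMAS AND PROOFS =====

-- value of a dp cell, seen in ZMod 1000000007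
def dpZ (dp : List Int) (t : Nat) : ZMod 1000000007 := ((dp.getD t 0 : Int) : ZMod 1000000007)

-- all dp cells lie in [0, 1000000007)
def Bnd (dp : List Int) : Prop := ∀ i : Nat, 0 ≤ dp.getD i 0 ∧ dp.getD i 0 < 1000000007

-- B's recursion, mirrored in ZMod 1000000007 (no explicit `%`)
def FZ (m : PySem.Dict Int (List Int)) (full : Nat) : Nat → Int → Nat → ZMod 1000000007
  | 0, _, mask => if mask == full then 1 else 0
  | fuel+1, hat, mask =>
    FZ m full fuel (hat+1) mask +
    (if m.contains hat then
      ((m.getD hat []).map (fun person =>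
        if mask &&& (1 <<< person.toNat) == 0 then
          FZ m full fuel (hat+1) (mask ||| (1 <<< person.toNat))
        else 0)).sum
     else 0)

lemma getD_set0 (l : List Int) (i j : Nat) (a : Int) :
    (l.set i a).getD j 0 = if i = j ∧ i < l.length then a else l.getD j 0 := by
  simp only [List.getD_eq_getElem?_getD, List.getElem?_set]
  by_cases h1 : i = j
  · subst h1
    by_cases h2 : i < l.length
    · simp [h2]
    · have : l[i]? = none := by
        rw [List.getElem?_eq_none_iff]; omega
      simp [h2, this]
  · simp [h1]

lemma getD_replicate0 (n i : Nat) : (List.replicate n (0 : Int)).getD i 0 = 0 := by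
  simp [List.getD_eq_getElem?_getD, List.getElem?_replicate]
  split <;> simp

lemma sum_swap_list {α β : Type} (s : Finset α) (P : List β) (g : α → β → ZMod 1000000007) :
    ∑ t ∈ s, (P.map (fun b => g t b)).sum = (P.map (fun b => ∑ t ∈ s, g t b)).sum := by
  induction P with
  | nil => simp
  | cons x xs ih => simp [List.map_cons, List.sum_cons, Finset.sum_add_distrib, ih]

lemma and_shift_eq_zero_iff (m p : Nat) : (m &&& (1 <<< p) = 0) ↔ m.testBit p = false := by
  rw [Nat.one_shiftLeft, Nat.and_two_pow]
  cases h : m.testBit p <;> simp [h, (Nat.two_pow_pos p).ne']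

lemma testBit_shift_self (p : Nat) : (1 <<< p).testBit p = true := by
  rw [Nat.one_shiftLeft]; exact Nat.testBit_two_pow_self

lemma xor_eq_or_of_unset (x p : Nat) (h : x.testBit p = false) :
    x ^^^ (1 <<< p) = x ||| (1 <<< p) := by
  apply Nat.eq_of_testBit_eq; intro j
  simp only [Nat.testBit_xor, Nat.testBit_or, Nat.one_shiftLeft, Nat.testBit_two_pow]
  by_cases hj : p = j
  · subst hj; simp [h]
  · simp [hj]

lemma or_ne_of_unset (m p : Nat) (h : m.testBit p = false) : m ||| (1 <<< p) ≠ m := by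
  intro he
  have : (m ||| (1 <<< p)).testBit p = true := by
    simp [Nat.testBit_or, testBit_shift_self]
  rw [he, h] at this; exact absurd this (by simp)

lemma lt_or_of_unset (m p : Nat) (h : m.testBit p = false) : m < m ||| (1 <<< p) :=
  lt_of_le_of_ne Nat.left_le_or (fun he => or_ne_of_unset m p h he.symm)

lemma shift_lt_pow (p N : Nat) (h : p < N) : 1 <<< p < 1 <<< N := by
  rw [Nat.one_shiftLeft, Nat.one_shiftLeft]
  exact Nat.pow_lt_pow_right (by norm_num) h

-- the key bit identity: (mask set-free at p and mask|bit = t) ↔ (t has bit p and t^bit = mask)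
lemma cond_equiv (mk t p : Nat) :
    (mk &&& (1 <<< p) = 0 ∧ mk ||| (1 <<< p) = t) ↔ (t.testBit p = true ∧ t ^^^ (1 <<< p) = mk) := by
  rw [and_shift_eq_zero_iff]
  constructor
  · rintro ⟨h1, rfl⟩
    refine ⟨by simp [Nat.testBit_or, testBit_shift_self], ?_⟩
    apply Nat.eq_of_testBit_eq; intro j
    simp only [Nat.testBit_xor, Nat.testBit_or, Nat.one_shiftLeft, Nat.testBit_two_pow]
    by_cases hj : p = j
    · subst hj; simpa using h1
    · simp [hj]
  · rintro ⟨h1, rfl⟩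
    refine ⟨?_, ?_⟩
    · simp only [Nat.testBit_xor, Nat.one_shiftLeft, Nat.testBit_two_pow]
      simp [h1]
    · apply Nat.eq_of_testBit_eq; intro j
      simp only [Nat.testBit_xor, Nat.testBit_or, Nat.one_shiftLeft, Nat.testBit_two_pow]
      by_cases hj : p = j
      · subst hj; simp [h1]
      · simp [hj]

lemma cast_mod_p (a : Int) : ((a % (1000000007 : Int) : Int) : ZMod 1000000007) = (a : ZMod 1000000007) := by
  have h : ((1000000007 : Nat) : Int) = (1000000007 : Int) := by norm_num
  rw [← h]; exact ZMod.intCast_mod a 1000000007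

lemma mod_bounds (a : Int) : 0 ≤ a % 1000000007 ∧ a % 1000000007 < 1000000007 :=
  ⟨Int.emod_nonneg a (by norm_num), Int.emod_lt_of_pos a (by norm_num)⟩

-- ========== B side: bounds and cast ==========

lemma altF_bounds (m : PySem.Dict Int (List Int)) (full : Nat) :
    ∀ (k : Nat) (hat : Int) (mask : Nat),
      0 ≤ altF m full k hat mask ∧ altF m full k hat mask < 1000000007 := by
  intro k hat mask
  cases k with
  | zero => simp only [altF]; split <;> norm_num
  | succ k => simp only [altF]; exact mod_bounds _

lemma foldl_if_add_cast (c : Int → Bool) (g : Int → Int) :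
    ∀ (L : List Int) (t0 : Int),
      ((L.foldl (fun t per => if c per then t + g per else t) t0 : Int) : ZMod 1000000007) =
        (t0 : ZMod 1000000007) +
          (L.map (fun per => if c per then ((g per : Int) : ZMod 1000000007) else 0)).sum := by
  intro L
  induction L with
  | nil => simp
  | cons x xs ih =>
    intro t0
    simp only [List.foldl_cons, List.map_cons, List.sum_cons]
    by_cases hx : c x
    · rw [ih, if_pos hx, if_pos hx]; push_cast; ring
    · rw [ih, if_neg hx, if_neg hx]; ring

lemma altF_cast (m : PySem.Dict Int (List Int)) (full : Nat) :
    ∀ (k : Nat) (hat : Int) (mask : Nat),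
      ((altF m full k hat mask : Int) : ZMod 1000000007) = FZ m full k hat mask := by
  intro k
  induction k with
  | zero => intro hat mask; simp only [altF, FZ]; split <;> simp
  | succ k ih =>
    intro hat mask
    simp only [altF, FZ]
    rw [cast_mod_p]
    by_cases hc : m.contains hat
    · simp only [hc, if_true]
      rw [foldl_if_add_cast (fun per => mask &&& (1 <<< per.toNat) == 0)
        (fun per => altF m full k (hat+1) (mask ||| (1 <<< per.toNat)))]
      rw [ih]
      congr 1
      apply congrArg List.sum
      apply List.map_eq_map_iff.mpr
      intro per _
      by_cases hb : (mask &&& (1 <<< per.toNat) == 0) <;> simp [hb, ih]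
    · simp [hc, ih]

-- ========== buildMap: every recorded person is a valid index ==========

lemma inner_inv (p : Int) (Q : Int → Prop) (hQ : Q p) :
    ∀ (L : List Int) (d : PySem.Dict Int (List Int)),
      (∀ h per, per ∈ d.getD h [] → Q per) →
      ∀ h per, per ∈ (L.foldl (fun d hat => d.modify hat [] (· ++ [p])) d).getD h [] → Q per := by
  intro L
  induction L with
  | nil => intro d hd; simpa using hd
  | cons x xs ih =>
    intro d hd h per hmem
    refine ih _ ?_ h per hmem
    intro h' per' hmem'
    rw [PySem.Dict.getD_modify] at hmem'
    by_cases hx : h' = x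
    · rw [if_pos hx] at hmem'
      rcases List.mem_append.mp hmem' with h1 | h1
      · exact hd _ _ h1
      · simp at h1; subst h1; exact hQ
    · rw [if_neg hx] at hmem'
      exact hd _ _ hmem'

lemma outer_inv (Q : Int → Prop) :
    ∀ (L : List (Int × List Int)) (d : PySem.Dict Int (List Int)),
      (∀ h per, per ∈ d.getD h [] → Q per) →
      (∀ pl ∈ L, Q pl.1) →
      ∀ h per, per ∈ (L.foldl (fun d pl => pl.2.foldl (fun d hat => d.modify hat [] (· ++ [pl.1])) d) d).getD h [] → Q per := by
  intro L
  induction L with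
  | nil => intro d hd _; simpa using hd
  | cons x xs ih =>
    intro d hd hL h per hmem
    refine ih _ ?_ (fun pl hpl => hL pl (List.mem_cons_of_mem _ hpl)) h per hmem
    exact inner_inv x.1 Q (hL x (List.mem_cons_self)) x.2 d hd

lemma buildMap_persons (hats : List (List Int)) :
    ∀ h per, per ∈ (buildMap hats).getD h [] → 0 ≤ per ∧ per.toNat < hats.length := by
  unfold buildMap
  apply outer_inv
  · intro h per hmem; simp [PySem.Dict.getD_empty] at hmem
  · intro pl hpl
    rcases (PySem.List.mem_enumerate_iff _ _ _).mp hpl with ⟨k, hk, hpl'⟩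
    subst hpl'
    constructor
    · simp
    · simp; omega

-- ========== A side: the per-person fold ==========

lemma aInner_spec (N : Nat) :
    ∀ (people : List Int) (mask : Nat) (dp : List Int),
      dp.length = 1 <<< N → Bnd dp → mask < 1 <<< N →
      (∀ per ∈ people, 0 ≤ per ∧ per.toNat < N) →
      (aInner 1000000007 people mask dp).length = dp.length ∧
      Bnd (aInner 1000000007 people mask dp) ∧
      (∀ i ≤ mask, (aInner 1000000007 people mask dp).getD i 0 = dp.getD i 0) ∧
      (∀ t : Nat, dpZ (aInner 1000000007 people mask dp) t = dpZ dp t +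
        (people.map (fun per =>
          if mask &&& (1 <<< per.toNat) = 0 ∧ mask ||| (1 <<< per.toNat) = t
          then dpZ dp mask else 0)).sum) := by
  intro people
  induction people with
  | nil => intro mask dp hlen hb hm _; refine ⟨rfl, hb, fun _ _ => rfl, fun t => by simp [aInner]⟩
  | cons per rest ih =>
    intro mask dp hlen hb hm hp
    have hper := hp per List.mem_cons_self
    have hrest : ∀ q ∈ rest, 0 ≤ q ∧ q.toNat < N := fun q hq => hp q (List.mem_cons_of_mem _ hq)
    by_cases hset : mask &&& (1 <<< per.toNat) = 0
    · -- bit free: one in-place update, then the rest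
      have hbit : mask.testBit per.toNat = false := (and_shift_eq_zero_iff _ _).mp hset
      set nm := mask ||| (1 <<< per.toNat) with hnm
      have hnmlt : nm < 1 <<< N := by
        have hm' : mask < 2 ^ N := by rwa [Nat.one_shiftLeft N] at hm
        have h2' : 1 <<< per.toNat < 2 ^ N := by
          have := shift_lt_pow per.toNat N hper.2
          rwa [Nat.one_shiftLeft N] at this
        have h3 : mask ||| 1 <<< per.toNat < 2 ^ N := Nat.or_lt_two_pow hm' h2'
        rw [hnm, Nat.one_shiftLeft N]
        exact h3
      have hgt : mask < nm := lt_or_of_unset mask per.toNat hbit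
      set dp' := dp.set nm ((dp.getD nm 0 + dp.getD mask 0) % 1000000007) with hdp'
      have hlen' : dp'.length = dp.length := by simp [hdp']
      have hget' : ∀ j : Nat, dp'.getD j 0 =
          if nm = j ∧ nm < dp.length then (dp.getD nm 0 + dp.getD mask 0) % 1000000007
          else dp.getD j 0 := fun j => getD_set0 dp nm j _
      have hb' : Bnd dp' := by
        intro i; rw [hget']; split
        · exact mod_bounds _
        · exact hb i
      have hlow : ∀ i ≤ mask, dp'.getD i 0 = dp.getD i 0 := by
        intro i hi; rw [hget']; rw [if_neg]; rintro ⟨h1, -⟩; omega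
      have hmaskval : dp'.getD mask 0 = dp.getD mask 0 := hlow mask le_rfl
      have hstep : aInner 1000000007 (per :: rest) mask dp = aInner 1000000007 rest mask dp' := by
        simp only [aInner, List.foldl_cons]
        rw [if_pos (by simpa using hset)]
      obtain ⟨l1, b1, lo1, s1⟩ := ih mask dp' (by rw [hlen', hlen]) hb' hm hrest
      rw [hstep]
      refine ⟨by rw [l1, hlen'], b1, ?_, ?_⟩
      · intro i hi; rw [lo1 i hi, hlow i hi]
      · intro t
        rw [s1 t]
        have hZmask : dpZ dp' mask = dpZ dp mask := by unfold dpZ; rw [hmaskval]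
        have hZt : dpZ dp' t = dpZ dp t +
            (if mask &&& (1 <<< per.toNat) = 0 ∧ mask ||| (1 <<< per.toNat) = t
             then dpZ dp mask else 0) := by
          unfold dpZ; rw [hget']
          by_cases ht : nm = t
          · subst ht
            rw [if_pos ⟨rfl, by omega⟩, if_pos ⟨hset, rfl⟩, cast_mod_p]
            push_cast; ring
          · rw [if_neg (by rintro ⟨h1, -⟩; exact ht h1), if_neg (by rintro ⟨-, h2⟩; exact ht h2)]
            ring
        rw [hZt]
        simp only [List.map_cons, List.sum_cons]
        have : (rest.map (fun q =>
            if mask &&& (1 <<< q.toNat) = 0 ∧ mask ||| (1 <<< q.toNat) = t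
            then dpZ dp' mask else 0)).sum =
          (rest.map (fun q =>
            if mask &&& (1 <<< q.toNat) = 0 ∧ mask ||| (1 <<< q.toNat) = t
            then dpZ dp mask else 0)).sum := by
          apply congrArg List.sum
          apply List.map_eq_map_iff.mpr
          intro q _; rw [hZmask]
        rw [this]; ring
    · -- bit taken: skip this person
      have hstep : aInner 1000000007 (per :: rest) mask dp = aInner 1000000007 rest mask dp := by
        simp only [aInner, List.foldl_cons]
        rw [if_neg (by simpa using hset)]
      obtain ⟨l1, b1, lo1, s1⟩ := ih mask dp hlen hb hm hrest
      rw [hstep]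
      refine ⟨l1, b1, lo1, ?_⟩
      intro t
      rw [s1 t]
      simp only [List.map_cons, List.sum_cons]
      rw [if_neg (by rintro ⟨h1, -⟩; exact hset h1)]
      ring

-- ========== A side: the descending mask fold ==========

lemma maskFold_spec (N : Nat) (people : List Int)
    (hp : ∀ per ∈ people, 0 ≤ per ∧ per.toNat < N) :
    ∀ (M : Nat) (dp : List Int), M ≤ 1 <<< N → dp.length = 1 <<< N → Bnd dp →
      (((List.range M).reverse).foldl (aMaskStep 1000000007 people) dp).length = dp.length ∧
      Bnd (((List.range M).reverse).foldl (aMaskStep 1000000007 people) dp) ∧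
      ∀ t : Nat, dpZ (((List.range M).reverse).foldl (aMaskStep 1000000007 people) dp) t =
        dpZ dp t + (people.map (fun per =>
          if t.testBit per.toNat = true ∧ t ^^^ (1 <<< per.toNat) < M
          then dpZ dp (t ^^^ (1 <<< per.toNat)) else 0)).sum := by
  intro M
  induction M with
  | zero =>
    intro dp _ _ hb
    refine ⟨rfl, hb, fun t => ?_⟩
    simp
  | succ M ih =>
    intro dp hM hlen hb
    have hrev : (List.range (M+1)).reverse = M :: (List.range M).reverse := by
      rw [List.range_succ, List.reverse_append]; simp
    rw [hrev]
    simp only [List.foldl_cons]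
    set dp1 := aMaskStep 1000000007 people dp M with hdp1
    have hMlt : M < 1 <<< N := by omega
    -- facts about dp1
    have key : dp1.length = dp.length ∧ Bnd dp1 ∧
        (∀ i ≤ M, dp1.getD i 0 = dp.getD i 0) ∧
        (∀ t : Nat, dpZ dp1 t = dpZ dp t +
          (people.map (fun per =>
            if M &&& (1 <<< per.toNat) = 0 ∧ M ||| (1 <<< per.toNat) = t
            then dpZ dp M else 0)).sum) := by
      rw [hdp1]; unfold aMaskStep
      by_cases hz : dp.getD M 0 == 0
      · rw [if_pos hz]
        have hzv : dp.getD M 0 = 0 := by simpa using hz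
        refine ⟨rfl, hb, fun _ _ => rfl, fun t => ?_⟩
        have hZ0 : dpZ dp M = 0 := by unfold dpZ; rw [hzv]; simp
        have : (people.map (fun per =>
            if M &&& (1 <<< per.toNat) = 0 ∧ M ||| (1 <<< per.toNat) = t
            then dpZ dp M else 0)).sum = 0 := by
          apply List.sum_eq_zero
          intro x hx
          rcases List.mem_map.mp hx with ⟨q, -, rfl⟩
          simp [hZ0]
        rw [this]; ring
      · rw [if_neg hz]
        obtain ⟨l1, b1, lo1, s1⟩ := aInner_spec N people M dp hlen hb hMlt hp
        exact ⟨l1, b1, lo1, fun t => s1 t⟩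
    obtain ⟨kl, kb, klo, ks⟩ := key
    obtain ⟨l2, b2, s2⟩ := ih dp1 (by omega) (by rw [kl, hlen]) kb
    refine ⟨by rw [l2, kl], b2, fun t => ?_⟩
    rw [s2 t, ks t]
    -- rewrite dp1 sources below M back to dp
    have hsrc : (people.map (fun per =>
        if t.testBit per.toNat = true ∧ t ^^^ (1 <<< per.toNat) < M
        then dpZ dp1 (t ^^^ (1 <<< per.toNat)) else 0)).sum =
      (people.map (fun per =>
        if t.testBit per.toNat = true ∧ t ^^^ (1 <<< per.toNat) < M
        then dpZ dp (t ^^^ (1 <<< per.toNat)) else 0)).sum := by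
      apply congrArg List.sum
      apply List.map_eq_map_iff.mpr
      intro q _
      by_cases hq : t.testBit q.toNat = true ∧ t ^^^ (1 <<< q.toNat) < M
      · rw [if_pos hq, if_pos hq]
        unfold dpZ; rw [klo _ (by omega)]
      · rw [if_neg hq, if_neg hq]
    rw [hsrc]
    have merge : ∀ per : Int,
        (if M &&& (1 <<< per.toNat) = 0 ∧ M ||| (1 <<< per.toNat) = t
         then dpZ dp M else 0) +
        (if t.testBit per.toNat = true ∧ t ^^^ (1 <<< per.toNat) < M
         then dpZ dp (t ^^^ (1 <<< per.toNat)) else 0) =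
        (if t.testBit per.toNat = true ∧ t ^^^ (1 <<< per.toNat) < M + 1
         then dpZ dp (t ^^^ (1 <<< per.toNat)) else 0) := by
      intro q
      by_cases h1 : t.testBit q.toNat = true
      · by_cases h2 : t ^^^ (1 <<< q.toNat) = M
        · rw [if_pos ((cond_equiv M t q.toNat).mpr ⟨h1, h2⟩),
            if_neg (by rintro ⟨-, hlt⟩; omega),
            if_pos ⟨h1, by omega⟩, h2]
          ring
        · rw [if_neg (fun hc => h2 ((cond_equiv M t q.toNat).mp hc).2)]
          by_cases h3 : t ^^^ (1 <<< q.toNat) < M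
          · rw [if_pos ⟨h1, h3⟩, if_pos ⟨h1, by omega⟩]; ring
          · rw [if_neg (by rintro ⟨-, hlt⟩; exact h3 hlt),
              if_neg (by rintro ⟨-, hlt⟩; omega)]
            ring
      · rw [if_neg (fun hc => h1 ((cond_equiv M t q.toNat).mp hc).1),
          if_neg (by rintro ⟨hb1, -⟩; exact h1 hb1),
          if_neg (by rintro ⟨hb1, -⟩; exact h1 hb1)]
        ring
    calc dpZ dp t + (people.map (fun per =>
            if M &&& (1 <<< per.toNat) = 0 ∧ M ||| (1 <<< per.toNat) = t
            then dpZ dp M else 0)).sum +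
          (people.map (fun per =>
            if t.testBit per.toNat = true ∧ t ^^^ (1 <<< per.toNat) < M
            then dpZ dp (t ^^^ (1 <<< per.toNat)) else 0)).sum
        = dpZ dp t + ((people.map (fun per =>
            (if M &&& (1 <<< per.toNat) = 0 ∧ M ||| (1 <<< per.toNat) = t
              then dpZ dp M else 0) +
            (if t.testBit per.toNat = true ∧ t ^^^ (1 <<< per.toNat) < M
              then dpZ dp (t ^^^ (1 <<< per.toNat)) else 0))).sum) := by
          rw [add_assoc, ← List.sum_map_add]
      _ = dpZ dp t + (people.map (fun per =>
            if t.testBit per.toNat = true ∧ t ^^^ (1 <<< per.toNat) < M + 1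
            then dpZ dp (t ^^^ (1 <<< per.toNat)) else 0)).sum := by
          congr 1
          apply congrArg List.sum
          apply List.map_eq_map_iff.mpr
          intro q _; exact merge q

-- ========== the exchange step: one hat of A's forward dp = one unfolding of B's recursion ==========

lemma hatStep_exchange (N : Nat) (mp : PySem.Dict Int (List Int)) (full : Nat)
    (hmp : ∀ h per, per ∈ mp.getD h [] → 0 ≤ per ∧ per.toNat < N)
    (j : Nat) (hat : Int) (dp : List Int) (hlen : dp.length = 1 <<< N) (hb : Bnd dp) :
    ∑ t ∈ Finset.range (1 <<< N), dpZ (aHatStep N mp dp hat) t * FZ mp full j (hat+1) t =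
    ∑ t ∈ Finset.range (1 <<< N), dpZ dp t * FZ mp full (j+1) hat t := by
  unfold aHatStep
  cases hget : mp.get? hat with
  | none =>
    have hc : mp.contains hat = false := by
      rw [PySem.Dict.contains_eq_isSome_get?, hget]; rfl
    apply Finset.sum_congr rfl
    intro t _
    simp [FZ, hc]
  | some people =>
    have hpd : mp.getD hat [] = people := PySem.Dict.getD_of_get?_eq_some _ _ hget
    have hc : mp.contains hat = true := by
      rw [PySem.Dict.contains_eq_isSome_get?, hget]; rfl
    have hp : ∀ per ∈ people, 0 ≤ per ∧ per.toNat < N := by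
      intro per hper; exact hmp hat per (by rwa [hpd])
    obtain ⟨-, -, hs⟩ := maskFold_spec N people hp (1 <<< N) dp le_rfl hlen hb
    have step1 : ∑ t ∈ Finset.range (1 <<< N),
        dpZ (((List.range (1 <<< N)).reverse).foldl (aMaskStep 1000000007 people) dp) t *
          FZ mp full j (hat+1) t =
      ∑ t ∈ Finset.range (1 <<< N),
        (dpZ dp t * FZ mp full j (hat+1) t +
         (people.map (fun per =>
            (if t.testBit per.toNat = true then dpZ dp (t ^^^ (1 <<< per.toNat)) else 0) *
              FZ mp full j (hat+1) t)).sum) := by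
      apply Finset.sum_congr rfl
      intro t ht
      rw [hs t, add_mul]
      congr 1
      rw [← List.sum_map_mul_right]
      apply congrArg List.sum
      apply List.map_eq_map_iff.mpr
      intro q hq
      have hlt : t ^^^ (1 <<< q.toNat) < 1 <<< N := by
        have h1 : t < 2 ^ N := by
          have := Finset.mem_range.mp ht; rwa [Nat.one_shiftLeft N] at this
        have h2 : (1 <<< q.toNat) < 2 ^ N := by
          have := shift_lt_pow q.toNat N (hp q hq).2; rwa [Nat.one_shiftLeft N] at this
        rw [Nat.one_shiftLeft N]
        exact Nat.xor_lt_two_pow h1 h2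
      by_cases hbit : t.testBit q.toNat = true
      · rw [if_pos ⟨hbit, hlt⟩, if_pos hbit]
      · rw [if_neg (by rintro ⟨h1, -⟩; exact hbit h1), if_neg hbit, zero_mul]
    rw [step1, Finset.sum_add_distrib, sum_swap_list]
    have inner_eq : ∀ q ∈ people,
        (∑ t ∈ Finset.range (1 <<< N),
          (if t.testBit q.toNat = true then dpZ dp (t ^^^ (1 <<< q.toNat)) else 0) *
            FZ mp full j (hat+1) t) =
        ∑ s ∈ Finset.range (1 <<< N),
          (if s &&& (1 <<< q.toNat) = 0
           then dpZ dp s * FZ mp full j (hat+1) (s ||| (1 <<< q.toNat)) else 0) := by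
      intro q hq
      have hqN := (hp q hq).2
      have hbitlt : (1 <<< q.toNat) < 1 <<< N := shift_lt_pow _ _ hqN
      rw [show (∑ t ∈ Finset.range (1 <<< N),
          (if t.testBit q.toNat = true then dpZ dp (t ^^^ (1 <<< q.toNat)) else 0) *
            FZ mp full j (hat+1) t) =
        ∑ t ∈ (Finset.range (1 <<< N)).filter (fun t => t.testBit q.toNat = true),
          dpZ dp (t ^^^ (1 <<< q.toNat)) * FZ mp full j (hat+1) t from by
          rw [Finset.sum_filter]
          apply Finset.sum_congr rfl
          intro t _
          by_cases hbit : t.testBit q.toNat = true <;> simp [hbit]]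
      rw [show (∑ s ∈ Finset.range (1 <<< N),
          (if s &&& (1 <<< q.toNat) = 0
           then dpZ dp s * FZ mp full j (hat+1) (s ||| (1 <<< q.toNat)) else 0)) =
        ∑ s ∈ (Finset.range (1 <<< N)).filter (fun s => s.testBit q.toNat = false),
          dpZ dp s * FZ mp full j (hat+1) (s ||| (1 <<< q.toNat)) from by
          rw [Finset.sum_filter]
          apply Finset.sum_congr rfl
          intro s _
          by_cases hbit : s.testBit q.toNat = false
          · rw [if_pos hbit, if_pos ((and_shift_eq_zero_iff s q.toNat).mpr hbit)]
          · rw [if_neg hbit, if_neg (fun hz => hbit ((and_shift_eq_zero_iff s q.toNat).mp hz))]]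
      apply Finset.sum_nbij' (fun t => t ^^^ (1 <<< q.toNat)) (fun s => s ^^^ (1 <<< q.toNat))
      · intro t ht
        rcases Finset.mem_filter.mp ht with ⟨htr, htb⟩
        refine Finset.mem_filter.mpr ⟨?_, ?_⟩
        · rw [Finset.mem_range] at htr ⊢
          have htr' : t < 2 ^ N := by rwa [Nat.one_shiftLeft N] at htr
          have hb' : 1 <<< q.toNat < 2 ^ N := by rwa [Nat.one_shiftLeft N] at hbitlt
          rw [Nat.one_shiftLeft N]
          exact Nat.xor_lt_two_pow htr' hb'
        · simp only [Nat.testBit_xor, testBit_shift_self, htb]; rfl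
      · intro s hsf
        rcases Finset.mem_filter.mp hsf with ⟨hsr, hsb⟩
        refine Finset.mem_filter.mpr ⟨?_, ?_⟩
        · rw [Finset.mem_range] at hsr ⊢
          have hsr' : s < 2 ^ N := by rwa [Nat.one_shiftLeft N] at hsr
          have hb' : 1 <<< q.toNat < 2 ^ N := by rwa [Nat.one_shiftLeft N] at hbitlt
          rw [Nat.one_shiftLeft N]
          exact Nat.xor_lt_two_pow hsr' hb'
        · simp only [Nat.testBit_xor, testBit_shift_self, hsb]; rfl
      · intro t _; simp [Nat.xor_assoc]
      · intro s _; simp [Nat.xor_assoc]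
      · intro t ht
        rcases Finset.mem_filter.mp ht with ⟨-, htb⟩
        have hunset : (t ^^^ (1 <<< q.toNat)).testBit q.toNat = false := by
          simp only [Nat.testBit_xor, testBit_shift_self, htb]; rfl
        have hback : (t ^^^ (1 <<< q.toNat)) ||| (1 <<< q.toNat) = t := by
          rw [← xor_eq_or_of_unset _ _ hunset, Nat.xor_assoc]
          simp
        rw [hback]
    have swap_back : (people.map (fun q =>
        ∑ t ∈ Finset.range (1 <<< N),
          (if t.testBit q.toNat = true then dpZ dp (t ^^^ (1 <<< q.toNat)) else 0) *
            FZ mp full j (hat+1) t)).sum =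
      ∑ s ∈ Finset.range (1 <<< N), dpZ dp s *
        (people.map (fun q =>
          if s &&& (1 <<< q.toNat) == 0
          then FZ mp full j (hat+1) (s ||| (1 <<< q.toNat)) else 0)).sum := by
      have hmap : (people.map (fun q =>
          ∑ t ∈ Finset.range (1 <<< N),
            (if t.testBit q.toNat = true then dpZ dp (t ^^^ (1 <<< q.toNat)) else 0) *
              FZ mp full j (hat+1) t)) =
        (people.map (fun q => ∑ s ∈ Finset.range (1 <<< N),
          (if s &&& (1 <<< q.toNat) = 0
           then dpZ dp s * FZ mp full j (hat+1) (s ||| (1 <<< q.toNat)) else 0))) :=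
        List.map_eq_map_iff.mpr inner_eq
      rw [hmap, ← sum_swap_list]
      apply Finset.sum_congr rfl
      intro s _
      rw [← List.sum_map_mul_left]
      apply congrArg List.sum
      apply List.map_eq_map_iff.mpr
      intro q _
      by_cases hz : s &&& (1 <<< q.toNat) = 0
      · rw [if_pos hz, if_pos (show (s &&& (1 <<< q.toNat) == 0) = true by simpa using hz)]
      · rw [if_neg hz, if_neg (show ¬((s &&& (1 <<< q.toNat) == 0) = true) by simpa using hz), mul_zero]
    rw [swap_back, ← Finset.sum_add_distrib]
    apply Finset.sum_congr rfl
    intro s _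
    simp only [FZ, hc, if_true, hpd]
    ring

-- ========== the hat loop ==========

lemma aHatStep_preserves (N : Nat) (mp : PySem.Dict Int (List Int))
    (hmp : ∀ h per, per ∈ mp.getD h [] → 0 ≤ per ∧ per.toNat < N)
    (dp : List Int) (hat : Int) (hlen : dp.length = 1 <<< N) (hb : Bnd dp) :
    (aHatStep N mp dp hat).length = 1 <<< N ∧ Bnd (aHatStep N mp dp hat) := by
  unfold aHatStep
  cases hget : mp.get? hat with
  | none => exact ⟨hlen, hb⟩
  | some people =>
    have hpd : mp.getD hat [] = people := PySem.Dict.getD_of_get?_eq_some _ _ hget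
    have hp : ∀ per ∈ people, 0 ≤ per ∧ per.toNat < N := by
      intro per hper; exact hmp hat per (by rwa [hpd])
    obtain ⟨l1, b1, -⟩ := maskFold_spec N people hp (1 <<< N) dp le_rfl hlen hb
    exact ⟨by rw [l1, hlen], b1⟩

lemma hatFold_spec (N : Nat) (mp : PySem.Dict Int (List Int)) (full : Nat)
    (hmp : ∀ h per, per ∈ mp.getD h [] → 0 ≤ per ∧ per.toNat < N) :
    ∀ (j : Nat), j ≤ 41 → ∀ (hat : Int), hat = 41 - (j : Int) →
      ∀ dp : List Int, dp.length = 1 <<< N → Bnd dp →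
      Bnd ((PySem.List.pyRange hat 41 1).foldl (aHatStep N mp) dp) ∧
      ∑ t ∈ Finset.range (1 <<< N),
        dpZ ((PySem.List.pyRange hat 41 1).foldl (aHatStep N mp) dp) t * FZ mp full 0 41 t =
      ∑ t ∈ Finset.range (1 <<< N), dpZ dp t * FZ mp full j hat t := by
  intro j
  induction j with
  | zero =>
    intro _ hat hhat dp _ hb
    have h41 : hat = 41 := by omega
    subst h41
    have hnil : PySem.List.pyRange 41 41 1 = [] := by decide
    rw [hnil]
    exact ⟨hb, rfl⟩
  | succ j ih =>
    intro hj hat hhat dp hlen hb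
    have hlt : hat < 41 := by omega
    rw [PySem.List.pyRange_one_cons hlt]
    simp only [List.foldl_cons]
    obtain ⟨l1, b1⟩ := aHatStep_preserves N mp hmp dp hat hlen hb
    obtain ⟨b2, s2⟩ := ih (by omega) (hat+1) (by push_cast; omega) (aHatStep N mp dp hat) l1 b1
    refine ⟨b2, ?_⟩
    rw [s2]
    exact hatStep_exchange N mp full hmp j hat dp hlen hb

-- ========== assembly ==========

lemma int_eq_of_cast_eq (a b : Int) (ha : 0 ≤ a ∧ a < 1000000007) (hb : 0 ≤ b ∧ b < 1000000007)
    (h : (a : ZMod 1000000007) = (b : ZMod 1000000007)) : a = b := by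
  have hm : a % (1000000007 : Int) = b % (1000000007 : Int) := by
    have h2 := (ZMod.intCast_eq_intCast_iff a b 1000000007).mp h
    simpa [Int.ModEq] using h2
  omega

lemma dpZ0_eq (n i : Nat) (hn : 0 < n) :
    dpZ ((List.replicate n (0 : Int)).set 0 1) i = if i = 0 then 1 else 0 := by
  unfold dpZ
  rw [getD_set0, getD_replicate0]
  by_cases hi : i = 0
  · subst hi; rw [if_pos ⟨rfl, by simpa using hn⟩, if_pos rfl]; norm_num
  · rw [if_neg (by rintro ⟨h1, -⟩; exact hi h1.symm), if_neg hi]; norm_num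

-- ===== VERDICT (by name: the statement is the Claim_ definition above) =====
theorem numberWays_spec : Claim_equal_numberWays := by
  unfold Claim_equal_numberWays
  intro hats _
  unfold Spec_numberWays
  set N := hats.length with hN
  set mp := buildMap hats with hmpdef
  set full := (1 <<< N) - 1 with hfull
  set dp0 := (List.replicate (1 <<< N) (0 : Int)).set 0 1 with hdp0
  set dpF := (PySem.List.pyRange 1 41 1).foldl (aHatStep N mp) dp0 with hdpF
  have hpos : 0 < 1 <<< N := by rw [Nat.one_shiftLeft]; positivity
  have hlen0 : dp0.length = 1 <<< N := by simp [hdp0]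
  have hb0 : Bnd dp0 := by
    intro i
    rw [hdp0, getD_set0, getD_replicate0]
    split
    · norm_num
    · norm_num
  have hmp : ∀ h per, per ∈ mp.getD h [] → 0 ≤ per ∧ per.toNat < N :=
    fun h per hm => buildMap_persons hats h per hm
  obtain ⟨bF, sF⟩ := hatFold_spec N mp full hmp 40 (by norm_num) 1 (by norm_num) dp0 hlen0 hb0
  have hfull_mem : full ∈ Finset.range (1 <<< N) := Finset.mem_range.mpr (by omega)
  have hzero_mem : (0 : Nat) ∈ Finset.range (1 <<< N) := Finset.mem_range.mpr hpos
  have L1 : ∑ t ∈ Finset.range (1 <<< N), dpZ dpF t * FZ mp full 0 41 t = dpZ dpF full := by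
    have hterm : ∀ t ∈ Finset.range (1 <<< N),
        dpZ dpF t * FZ mp full 0 41 t = if t = full then dpZ dpF t else 0 := by
      intro t _
      simp only [FZ]
      by_cases ht : t = full
      · rw [if_pos (by simpa using ht), if_pos ht, mul_one]
      · rw [if_neg (by simpa using ht), if_neg ht, mul_zero]
    rw [Finset.sum_congr rfl hterm, Finset.sum_ite_eq' (Finset.range (1 <<< N)) full, if_pos hfull_mem]
  have R1 : ∑ t ∈ Finset.range (1 <<< N), dpZ dp0 t * FZ mp full 40 1 t = FZ mp full 40 1 0 := by
    have hterm : ∀ t ∈ Finset.range (1 <<< N),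
        dpZ dp0 t * FZ mp full 40 1 t = if t = 0 then FZ mp full 40 1 t else 0 := by
      intro t _
      rw [hdp0, dpZ0_eq _ _ hpos]
      by_cases ht : t = 0
      · rw [if_pos ht, if_pos ht, one_mul]
      · rw [if_neg ht, if_neg ht, zero_mul]
    rw [Finset.sum_congr rfl hterm, Finset.sum_ite_eq' (Finset.range (1 <<< N)) 0, if_pos hzero_mem]
  have hcast : ((dpF.getD full 0 : Int) : ZMod 1000000007) =
      ((altF mp full 40 1 0 : Int) : ZMod 1000000007) := by
    rw [altF_cast]
    have : dpZ dpF full = FZ mp full 40 1 0 := by rw [← L1, sF, R1]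
    exact this
  have hA : numberWays hats = dpF.getD full 0 := rfl
  have hB : numberWays_alt hats = altF mp full 40 1 0 := rfl
  rw [hA, hB]
  exact int_eq_of_cast_eq _ _ ⟨(bF full).1, (bF full).2⟩
    ⟨(altF_bounds mp full 40 1 0).1, (altF_bounds mp full 40 1 0).2⟩ hcast
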